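-- pv_equiv track=rewrite | github.com/mmal1nka/coursework1 | coursework/Vigenere/views.py | msg_and_key
-- ===== SOURCE A (Python) =====
-- def msg_and_key(msg, key):
--     if msg == '' or key == '' or len(msg) < len(key):
--         key_map = 'Error'
--         return key_map
--     else:
--         key_map = ""
--         j = 0
--         for i in range(len(msg)):
--             if 65 <= ord(msg[i]) <= 90:
--                 if j < len(key):
--                     key_map += key[j].upper()
--                     j += 1
--                 else:
--                     j = 0
--                     key_map += key[j].upper()
--                     j += 1
--             elif 97 <= ord(msg[i]) <= 122:
--                 if j < len(key):
--                     key_map += key[j]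
--                     j += 1
--                 else:
--                     j = 0
--                     key_map += key[j]
--                     j += 1
--             else:
--                 key_map += " "
--         return key_map
-- ===== SOURCE B (Python) =====
-- def msg_and_key(msg, key):
--     if msg == '' or key == '' or len(msg) < len(key):
--         return 'Error'
--     k = len(key)
--     # collect the (index, char) pairs of the letters, in order
--     pairs = [(i, c) for i, c in enumerate(msg) if 'A' <= c <= 'Z' or 'a' <= c <= 'z']
--     # scatter the key characters (modular indexing by letter rank) into a space-filled array
--     out = [' '] * len(msg)
--     for r, (i, c) in enumerate(pairs):
--         ch = key[r % k]
--         out[i] = ch.upper() if 'A' <= c <= 'Z' else ch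
--     return ''.join(out)
-- ===== Notes on version B (the rewrite author's own statement) =====
-- stated objective: alternative
-- what changed: A is one fused loop with a reset-to-zero key counter and branch ladder appending to a string; B first extracts the (index,char) pairs of the letters by a filtering comprehension, then scatter-assigns key[rank % len(key)] (case-adjusted) into a preallocated space-filled array and joins it, so non-letters are never visited in the second pass and the counter is replaced by modular arithmetic over ranks.
import Mathlib
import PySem

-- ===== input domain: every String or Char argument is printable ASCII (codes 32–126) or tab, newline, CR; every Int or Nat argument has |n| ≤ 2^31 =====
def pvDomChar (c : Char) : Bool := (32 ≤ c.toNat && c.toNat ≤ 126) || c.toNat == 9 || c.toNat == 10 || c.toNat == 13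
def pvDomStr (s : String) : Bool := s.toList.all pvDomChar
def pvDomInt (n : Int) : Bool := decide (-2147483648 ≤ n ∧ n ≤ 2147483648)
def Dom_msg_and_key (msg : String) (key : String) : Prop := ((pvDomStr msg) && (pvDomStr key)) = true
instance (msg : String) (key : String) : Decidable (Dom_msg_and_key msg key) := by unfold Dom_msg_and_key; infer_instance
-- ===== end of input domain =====

-- B replaces A's fused reset-counter loop by a filter-then-scatter scheme: collect the letter
-- (index,char) pairs, write key[rank % len(key)] (case-adjusted) into a preallocated space array,
-- join (objective: alternative decomposition, same cost).


-- 65 <= ord(c) <= 90  /  97 <= ord(c) <= 122 (the literal branch conditions of both Pythons)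
def pvIsUp (c : Char) : Bool := 65 ≤ c.toNat && c.toNat ≤ 90
def pvIsLow (c : Char) : Bool := 97 ≤ c.toNat && c.toNat ≤ 122

-- ===== PORT A =====
-- A's loop body: state = (key_map as List Char, j); string += ch ↦ acc ++ [ch];
-- key[j].upper() ↦ upperChar (exact: Python's single-char .upper() on any ASCII char)
def pvStepA (kL : List Char) (st : List Char × Nat) (c : Char) : List Char × Nat :=
  if pvIsUp c then
    if st.2 < kL.length then (st.1 ++ [PySem.Chars.upperChar (kL.getD st.2 ' ')], st.2 + 1)
    else (st.1 ++ [PySem.Chars.upperChar (kL.getD 0 ' ')], 1)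
  else if pvIsLow c then
    if st.2 < kL.length then (st.1 ++ [kL.getD st.2 ' '], st.2 + 1)
    else (st.1 ++ [kL.getD 0 ' '], 1)
  else (st.1 ++ [' '], st.2)

def msg_and_key (msg : String) (key : String) : String :=
  if msg.toList = [] ∨ key.toList = [] ∨ msg.toList.length < key.toList.length then
    "Error"
  else
    String.ofList (msg.toList.foldl (pvStepA key.toList) ([], 0)).1

-- ===== PORT B =====
-- 'A' <= c <= 'Z' or 'a' <= c <= 'z' (the comprehension's filter condition)
def pvAlpha (c : Char) : Bool := pvIsUp c || pvIsLow c

-- B's scatter step for one enumerated pair (r, (i, c)): out[i] = key[r % k] (.upper() if c is uppercase);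
-- r, i are Python ints from enumerate, hence PySem.Int.mod / pySetD / pyGetD
def pvStepB (kL : List Char) (o : List Char) (x : Int × (Int × Char)) : List Char :=
  let ch := PySem.List.pyGetD kL (PySem.Int.mod x.1 (kL.length : Int)) ' '
  PySem.List.pySetD o x.2.1 (if pvIsUp x.2.2 then PySem.Chars.upperChar ch else ch)

def msg_and_key_alt (msg : String) (key : String) : String :=
  if msg.toList = [] ∨ key.toList = [] ∨ msg.toList.length < key.toList.length then
    "Error"
  else
    String.ofList ((PySem.List.enumerate
        ((PySem.List.enumerate msg.toList 0).filter (fun p => pvAlpha p.2)) 0).foldl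
      (pvStepB key.toList) (List.replicate msg.toList.length ' '))

-- ===== PRECONDITION & SPEC =====
def Spec_msg_and_key (msg : String) (key : String) (out : String) : Prop := out = msg_and_key_alt msg key
instance (msg : String) (key : String) (out : String) : Decidable (Spec_msg_and_key msg key out) := by unfold Spec_msg_and_key; infer_instance

-- ===== CLAIM (what is proved, stated in full; the proofs are below) =====
def Claim_equal_msg_and_key : Prop := ∀ (msg : String) (key : String), Dom_msg_and_key msg key → Spec_msg_and_key msg key (msg_and_key msg key)

-- ===== LEMMAS AND PROOFS =====

-- reference stream: position p of the infinitely repeated key, i.e. key[p % |key|]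
def pvCore (kL : List Char) : List Char → Nat → List Char
  | [], _ => []
  | c :: cs, p =>
    if pvIsUp c then PySem.Chars.upperChar (kL.getD (p % kL.length) ' ') :: pvCore kL cs (p + 1)
    else if pvIsLow c then kL.getD (p % kL.length) ' ' :: pvCore kL cs (p + 1)
    else ' ' :: pvCore kL cs p

lemma pvCore_congr (kL : List Char) (cs : List Char) : ∀ p q : Nat,
    p % kL.length = q % kL.length → pvCore kL cs p = pvCore kL cs q := by
  induction cs with
  | nil => intro p q _; rfl
  | cons c cs ih =>
    intro p q h
    have h1 : (p + 1) % kL.length = (q + 1) % kL.length := by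
      rw [Nat.add_mod, h, ← Nat.add_mod]
    simp only [pvCore, h]
    split_ifs
    · rw [ih _ _ h1]
    · rw [ih _ _ h1]
    · rw [ih _ _ h]

lemma pvFoldA (kL : List Char) (hL : 0 < kL.length) (cs : List Char) :
    ∀ (acc : List Char) (j : Nat), j ≤ kL.length →
    (cs.foldl (pvStepA kL) (acc, j)).1 = acc ++ pvCore kL cs j := by
  induction cs with
  | nil => intro acc j _; simp [pvCore]
  | cons c cs ih =>
    intro acc j hj
    rw [List.foldl_cons]
    by_cases hup : pvIsUp c
    · by_cases hlt : j < kL.length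
      · rw [show pvStepA kL (acc, j) c = (acc ++ [PySem.Chars.upperChar (kL.getD j ' ')], j + 1)
            from by simp [pvStepA, hup, hlt]]
        rw [ih _ (j + 1) (by omega), pvCore]
        simp [hup, Nat.mod_eq_of_lt hlt]
      · have hjL : j = kL.length := by omega
        rw [show pvStepA kL (acc, j) c = (acc ++ [PySem.Chars.upperChar (kL.getD 0 ' ')], 1)
            from by simp [pvStepA, hup, hlt]]
        rw [ih _ 1 (by omega), pvCore]
        simp only [hup, if_true, hjL, Nat.mod_self]
        rw [pvCore_congr kL cs 1 (kL.length + 1) (by rw [Nat.add_mod, Nat.mod_self]; simp)]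
        simp
    · by_cases hlow : pvIsLow c
      · by_cases hlt : j < kL.length
        · rw [show pvStepA kL (acc, j) c = (acc ++ [kL.getD j ' '], j + 1)
              from by simp [pvStepA, hup, hlow, hlt]]
          rw [ih _ (j + 1) (by omega), pvCore]
          simp [hup, hlow, Nat.mod_eq_of_lt hlt]
        · have hjL : j = kL.length := by omega
          rw [show pvStepA kL (acc, j) c = (acc ++ [kL.getD 0 ' '], 1)
              from by simp [pvStepA, hup, hlow, hlt]]
          rw [ih _ 1 (by omega), pvCore]
          simp only [hup, hlow, Bool.false_eq_true, if_false, if_true, hjL, Nat.mod_self]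
          rw [pvCore_congr kL cs 1 (kL.length + 1) (by rw [Nat.add_mod, Nat.mod_self]; simp)]
          simp
      · rw [show pvStepA kL (acc, j) c = (acc ++ [' '], j) from by simp [pvStepA, hup, hlow]]
        rw [ih _ j hj, pvCore]
        simp [hup, hlow]

-- B's scatter fold over the enumerated letter pairs of cs (absolute indices from b, ranks from r)
-- equals: the untouched prefix of o, then the reference stream.
lemma pvFoldB (kL : List Char) (cs : List Char) :
    ∀ (b r : Nat) (o : List Char),
    o.length = b + cs.length →
    (∀ j, b ≤ j → j < o.length → o.getD j ' ' = ' ') →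
    ((PySem.List.enumerate ((PySem.List.enumerate cs (b : Int)).filter (fun p => pvAlpha p.2)) (r : Int)).foldl
        (pvStepB kL) o) = o.take b ++ pvCore kL cs r := by
  induction cs with
  | nil =>
    intro b r o hlen _
    simp only [PySem.List.enumerate_nil, List.filter_nil, List.foldl_nil, pvCore]
    rw [List.take_of_length_le (by simp at hlen; omega), List.append_nil]
  | cons c cs ih =>
    intro b r o hlen hsp
    have hb : b < o.length := by simp at hlen; omega
    rw [PySem.List.enumerate_cons]
    by_cases ha : pvAlpha c
    · -- letter: one set at position b with value styled key[r % |kL|], then recurse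
      rw [List.filter_cons_of_pos (by simpa using ha), PySem.List.enumerate_cons, List.foldl_cons]
      have hstep : pvStepB kL o ((r : Int), ((b : Int), c)) =
          o.set b (if pvIsUp c then PySem.Chars.upperChar (kL.getD (r % kL.length) ' ')
                   else kL.getD (r % kL.length) ' ') := by
        simp only [pvStepB, PySem.Int.mod_natCast, PySem.List.pyGetD_natCast,
          PySem.List.pySetD_natCast]
      rw [hstep]
      set v := (if pvIsUp c then PySem.Chars.upperChar (kL.getD (r % kL.length) ' ')
                else kL.getD (r % kL.length) ' ') with hv
      have hcast1 : ((b : Int) + 1) = ((b + 1 : Nat) : Int) := by push_cast; ring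
      have hcast2 : ((r : Int) + 1) = ((r + 1 : Nat) : Int) := by push_cast; ring
      rw [hcast1, hcast2, ih (b + 1) (r + 1) (o.set b v)
        (by simp at hlen ⊢; omega)
        (by
          intro j hj hjlen
          rw [List.getD_eq_getElem?_getD, List.getElem?_set_ne (by omega),
            ← List.getD_eq_getElem?_getD]
          exact hsp j (by omega) (by simpa using hjlen))]
      have htake : (o.set b v).take (b + 1) = o.take b ++ [v] := by
        rw [List.take_add_one, List.getElem?_set_self hb, List.take_set_of_le (Nat.le_refl b)]
        simp
      rw [htake]
      cases hup : pvIsUp c with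
      | true =>
        simp only [pvCore, hup, if_true, hv, List.append_assoc, List.singleton_append]
      | false =>
        have hlow : pvIsLow c = true := by
          cases hlo : pvIsLow c
          · exfalso; simp [pvAlpha, hup, hlo] at ha
          · rfl
        simp only [pvCore, hup, hlow, Bool.false_eq_true, if_false, if_true, hv,
          List.append_assoc, List.singleton_append]
    · -- non-letter: no set; the space already present at position b is the output char
      rw [List.filter_cons_of_neg (by simpa using ha)]
      have hcast1 : ((b : Int) + 1) = ((b + 1 : Nat) : Int) := by push_cast; ring
      rw [hcast1, ih (b + 1) r o (by simp at hlen ⊢; omega)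
        (fun j hj hjlen => hsp j (by omega) hjlen)]
      have hup : pvIsUp c = false := by
        cases h : pvIsUp c
        · rfl
        · exfalso; simp [pvAlpha, h] at ha
      have hlow : pvIsLow c = false := by
        cases h : pvIsLow c
        · rfl
        · exfalso; simp [pvAlpha, hup, h] at ha
      have htake : o.take (b + 1) = o.take b ++ [' '] := by
        rw [List.take_add_one, List.getElem?_eq_getElem hb]
        have := hsp b (Nat.le_refl b) hb
        rw [List.getD_eq_getElem?_getD, List.getElem?_eq_getElem hb] at this
        simp at this
        simp [this]
      rw [htake]
      simp only [pvCore, hup, hlow, Bool.false_eq_true, if_false,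
        List.append_assoc, List.singleton_append]

-- ===== VERDICT (by name: the statement is the Claim_ definition above) =====
theorem msg_and_key_spec : Claim_equal_msg_and_key := by
  intro msg key _
  unfold Spec_msg_and_key msg_and_key msg_and_key_alt
  by_cases hguard : msg.toList = [] ∨ key.toList = [] ∨ msg.toList.length < key.toList.length
  · rw [if_pos hguard, if_pos hguard]
  · rw [if_neg hguard, if_neg hguard]
    have hL : 0 < key.toList.length := by
      rcases h : key.toList with _ | _
      · exact absurd (Or.inr (Or.inl h)) hguard
      · simp
    rw [pvFoldA key.toList hL msg.toList [] 0 (by omega)]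
    have hB := pvFoldB key.toList msg.toList 0 0
      (List.replicate msg.toList.length ' ')
      (by simp)
      (by intro j _ hj; simp at hj; simp [List.getD_eq_getElem?_getD, hj])
    rw [show ((0 : Nat) : Int) = (0 : Int) from rfl] at hB
    rw [hB]
    simp
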